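-- pv_equiv track=rewrite | github.com/Y3drk/ASD_2021 | ASD_kolosy/opt_sum_19_20_1_2.py | opt_sum
-- ===== SOURCE A (Python) =====
-- def opt_sum(tab):
--     n = len(tab)
--     F = [[float('inf')] * n for _ in range(n)]
--
--     for i in range(n):
--         F[i][i] = abs(tab[i])
--
--     for i in range(n - 1):
--         F[i][i + 1] = abs(tab[i] + tab[i + 1])
--
--     S = [[float('inf')] * n for _ in range(n)]
--     for i in range(n):
--         S[i][i] = tab[i]
--
--     for a in range(n):
--         for b in range(a + 1, n):
--             S[a][b] = S[a][b - 1] + tab[b]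
--
--     for j in range(1, n):
--         for i in range(j - 2, -1, -1):
--             for l in range(j - i):
--                 F[i][j] = min(max(F[i + l + 1][j], F[i][i + l], abs(S[i][j])), F[i][j])
--
--     return F[0][n - 1]
-- ===== SOURCE B (Python) =====
-- def _feasible(P, n, v):
--     # Good(a,b): segment (a,b) of cut positions can be fully built with every
--     # node |P[y]-P[x]| <= v.  F[a] has bit b set iff Good(a,b); T[b] bit a iff Good(a,b).
--     F = [0] * (n + 1)
--     T = [0] * (n + 1)
--     for length in range(1, n + 1):
--         for a in range(n - length + 1):
--             b = a + length
--             if abs(P[b] - P[a]) <= v and (length <= 2 or F[a] & T[b]):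
--                 F[a] |= 1 << b
--                 T[b] |= 1 << a
--     return (F[0] >> n) & 1 == 1
--
-- def opt_sum(tab):
--     n = len(tab)
--     P = [0]
--     for x in tab:
--         P.append(P[-1] + x)
--     cands = set()
--     for a in range(n + 1):
--         for b in range(a + 1, n + 1):
--             cands.add(abs(P[b] - P[a]))
--     cands = sorted(cands)
--     lo, hi = 0, len(cands) - 1
--     while lo < hi:
--         mid = (lo + hi) // 2
--         if _feasible(P, n, cands[mid]):
--             hi = mid
--         else:
--             lo = mid + 1
--     return cands[lo]
-- ===== Notes on version B (the rewrite author's own statement) =====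
-- stated objective: faster
-- what changed: A fills an O(n^2) interval-DP table with an O(n) min-over-splits inner loop; B instead binary-searches the sorted set of candidate values |P[b]-P[a]| (P = prefix sums) and checks each candidate with a reachability DP over cut-interval gaps whose 'exists a valid split point' test is one bitmask AND on Python big-int bitsets.
import Mathlib
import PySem

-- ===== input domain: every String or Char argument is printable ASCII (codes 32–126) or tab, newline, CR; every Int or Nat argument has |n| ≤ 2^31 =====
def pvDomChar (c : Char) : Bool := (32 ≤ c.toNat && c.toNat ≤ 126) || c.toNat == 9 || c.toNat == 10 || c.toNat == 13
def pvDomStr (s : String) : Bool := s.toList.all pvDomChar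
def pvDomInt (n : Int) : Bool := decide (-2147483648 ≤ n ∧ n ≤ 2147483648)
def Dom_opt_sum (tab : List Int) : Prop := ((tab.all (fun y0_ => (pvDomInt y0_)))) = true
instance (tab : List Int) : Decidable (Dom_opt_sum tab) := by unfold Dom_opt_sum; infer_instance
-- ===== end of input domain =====

-- B replaces A's O(n^3) interval DP by a binary search over the sorted candidate values
-- |P[b]-P[a]| with a word-parallel (bitmask) reachability feasibility check per candidate;
-- measurably faster at the tested sizes.

-- ===== PORT A =====
-- A's tables hold Python floats float('inf') as sentinels next to ints; they are only ever
-- combined by min/max/abs/+, so `Option Int` with `none` = +inf models them exactly.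
def oAdd (x : Option Int) (y : Int) : Option Int := x.map (· + y)       -- inf + y = inf
def oAbs (x : Option Int) : Option Int := x.map (|·|)                   -- abs(inf) = inf
def oMax (x y : Option Int) : Option Int :=
  match x, y with
  | some a, some b => some (max a b)
  | _, _ => none
def oMin (x y : Option Int) : Option Int :=
  match x, y with
  | some a, some b => some (min a b)
  | some a, none => some a
  | none, y => y
-- m[i][j] read / write on a list-of-lists table (indices are in range in every use below)
def get2 (m : List (List (Option Int))) (i j : Nat) : Option Int := (m.getD i []).getD j none
def set2 (m : List (List (Option Int))) (i j : Nat) (v : Option Int) : List (List (Option Int)) :=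
  m.set i ((m.getD i []).set j v)
-- range(a, b) for 0 ≤ a ≤ b (exact for every use below; indices stay Nat)
def natRange (a b : Nat) : List Nat := (List.range (b - a)).map (a + ·)

def opt_sum (tab : List Int) : Int :=
  let n := tab.length
  let F := List.replicate n (List.replicate n (none : Option Int))
  let F := (List.range n).foldl (fun F i => set2 F i i (some |tab.getD i 0|)) F
  let F := (List.range (n - 1)).foldl
      (fun F i => set2 F i (i + 1) (some |tab.getD i 0 + tab.getD (i + 1) 0|)) F
  let S := List.replicate n (List.replicate n (none : Option Int))
  let S := (List.range n).foldl (fun S i => set2 S i i (some (tab.getD i 0))) S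
  let S := (List.range n).foldl
      (fun S a => (natRange (a + 1) n).foldl
        (fun S b => set2 S a b (oAdd (get2 S a (b - 1)) (tab.getD b 0))) S) S
  -- range(j-2, -1, -1) = [j-2, …, 0] = (List.range (j-1)).reverse for the j ≥ 1 used here
  let F := (natRange 1 n).foldl (fun F j =>
      ((List.range (j - 1)).reverse).foldl (fun F i =>
        (List.range (j - i)).foldl (fun F l =>
          set2 F i j (oMin (oMax (get2 F (i + l + 1) j)
                                 (oMax (get2 F i (i + l)) (oAbs (get2 S i j))))
                           (get2 F i j))) F) F) F
  (get2 F 0 (n - 1)).getD 0   -- the returned entry is always an int here (tab = [] raises, see Pre_)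

-- ===== PORT B =====
-- Good(a,b) ⇔ the cut interval (a,b) admits a full split tree with every node |P[y]-P[x]| ≤ v;
-- F[a] has bit b set iff Good(a,b), T[b] has bit a set iff Good(a,b) (Python big-int bitmasks → Nat).
def feasible (P : List Int) (n : Nat) (v : Int) : Bool :=
  let FT : List Nat × List Nat := (List.replicate (n + 1) 0, List.replicate (n + 1) 0)
  let FT := (natRange 1 (n + 1)).foldl (fun FT len =>
      (List.range (n - len + 1)).foldl (fun (FT : List Nat × List Nat) a =>
        let b := a + len
        if |P.getD b 0 - P.getD a 0| ≤ v ∧ (len ≤ 2 ∨ (FT.1.getD a 0) &&& (FT.2.getD b 0) ≠ 0)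
        then (FT.1.set a ((FT.1.getD a 0) ||| (1 <<< b)),
              FT.2.set b ((FT.2.getD b 0) ||| (1 <<< a)))
        else FT) FT) FT
  ((FT.1.getD 0 0) >>> n) &&& 1 == 1

-- the `while lo < hi` binary-search loop of Source B
def bsLoop (P : List Int) (n : Nat) (cands : List Int) (lo hi : Nat) : Nat :=
  if lo < hi then
    let mid := (lo + hi) / 2
    if feasible P n (cands.getD mid 0) then bsLoop P n cands lo mid
    else bsLoop P n cands (mid + 1) hi
  else lo
termination_by hi - lo
decreasing_by all_goals omega

def opt_sum_alt (tab : List Int) : Int :=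
  let n := tab.length
  let P := tab.foldl (fun (P : List Int) x => P ++ [P.getLastD 0 + x]) [0]
  let cands := (List.range (n + 1)).foldl (fun c a =>
      (natRange (a + 1) (n + 1)).foldl
        (fun (c : PySem.Set Int) b => c.add |P.getD b 0 - P.getD a 0|) c)
    (PySem.Set.empty)
  let cands := PySem.List.sorted cands (fun x => x) false
  cands.getD (bsLoop P n cands 0 (cands.length - 1)) 0

-- ===== PRECONDITION & SPEC =====
-- Pre_ excludes only the empty list, on which A raises IndexError (it reads row 0, column -1
-- of an empty table; B likewise raises IndexError there, indexing an empty candidate list).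
def Pre_opt_sum (tab : List Int) : Prop := tab ≠ []
instance (tab : List Int) : Decidable (Pre_opt_sum tab) := by unfold Pre_opt_sum; infer_instance
def pvWitness_opt_sum : List Int := [3, -1, 4, 1, -5, 9]

def Spec_opt_sum (tab : List Int) (out : Int) : Prop := out = opt_sum_alt tab
instance (tab : List Int) (out : Int) : Decidable (Spec_opt_sum tab out) := by unfold Spec_opt_sum; infer_instance

-- ===== CLAIM (what is proved, stated in full; the proofs are below) =====
def Claim_equal_opt_sum : Prop := ∀ (tab : List Int), Dom_opt_sum tab → Pre_opt_sum tab → Spec_opt_sum tab (opt_sum tab)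

-- ===== LEMMAS AND PROOFS =====

-- prefix sums: psum tab k = tab[0] + … + tab[k-1]; psums tab = the Python list P
def psum (tab : List Int) (k : Nat) : Int := (tab.take k).sum
def psums (tab : List Int) : List Int := (List.range (tab.length + 1)).map (fun k => psum tab k)

-- the common reference recurrence, on cut positions 0 ≤ a < b ≤ n over the prefix list P
def gR (P : List Int) (a b : Nat) : Int :=
  if b ≤ a + 2 then |P.getD b 0 - P.getD a 0|
  else
    ((List.range (b - a - 1)).attach.foldl
      (fun (m : Option Int) l =>
        oMin (some (max (gR P (a + l.1 + 1) b)
                        (max (gR P a (a + l.1 + 1)) |P.getD b 0 - P.getD a 0|))) m) none).getD 0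
termination_by b - a
decreasing_by
  · have := l.2; simp [List.mem_range] at this; omega
  · have := l.2; simp [List.mem_range] at this; omega


-- ---------- generic list/fold infrastructure ----------
theorem getD_set_self {α : Type} (l : List α) (i : Nat) (v d : α) (h : i < l.length) :
    (l.set i v).getD i d = v := by
  simp [List.getD, h]

theorem getD_set_ne {α : Type} (l : List α) (i k : Nat) (v d : α) (h : k ≠ i) :
    (l.set i v).getD k d = l.getD k d := by
  simp [List.getD, List.getElem?_set_ne (Ne.symm h)]

theorem foldl_range_inv {σ : Type} (f : σ → Nat → σ) (K : Nat) (Inv : σ → Nat → Prop) (s : σ)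
    (h0 : Inv s 0) (hs : ∀ t k, k < K → Inv t k → Inv (f t k) (k + 1)) :
    Inv ((List.range K).foldl f s) K := by
  induction K with
  | zero => simpa using h0
  | succ K ih =>
      rw [List.range_succ, List.foldl_append]
      exact hs _ K (Nat.lt_succ_self K)
        (ih (fun t k hk => hs t k (Nat.lt_succ_of_lt hk)))

theorem foldl_range_rev_inv {σ : Type} (f : σ → Nat → σ) (K : Nat) (Inv : σ → Nat → Prop) (s : σ)
    (h0 : Inv s K) (hs : ∀ t k, k < K → Inv t (k + 1) → Inv (f t k) k) :
    Inv (((List.range K).reverse).foldl f s) 0 := by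
  induction K generalizing s with
  | zero => simpa using h0
  | succ K ih =>
      rw [List.range_succ, List.reverse_append]
      simp only [List.reverse_singleton, List.singleton_append, List.foldl_cons]
      exact ih (f s K) (hs s K (Nat.lt_succ_self K) h0)
        (fun t k hk => hs t k (Nat.lt_succ_of_lt hk))

theorem foldl_natRange {σ : Type} (f : σ → Nat → σ) (a b : Nat) (s : σ) :
    (natRange a b).foldl f s = (List.range (b - a)).foldl (fun t k => f t (a + k)) s := by
  simp [natRange, List.foldl_map]

theorem mem_natRange (a b x : Nat) : x ∈ natRange a b ↔ a ≤ x ∧ x < b := by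
  simp only [natRange, List.mem_map, List.mem_range]
  constructor
  · rintro ⟨k, hk, rfl⟩; omega
  · rintro ⟨h1, h2⟩; exact ⟨x - a, by omega, by omega⟩

-- ---------- prefix sums ----------
theorem psums_getD (tab : List Int) (k : Nat) (hk : k ≤ tab.length) :
    (psums tab).getD k 0 = psum tab k := by
  unfold psums
  rw [List.getD_eq_getElem?_getD, List.getElem?_map]
  rw [List.getElem?_range (by omega : k < tab.length + 1)]
  rfl

theorem psum_succ (tab : List Int) (k : Nat) (hk : k < tab.length) :
    psum tab (k + 1) = psum tab k + tab.getD k 0 := by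
  unfold psum
  rw [List.getD_eq_getElem _ _ hk]
  exact List.sum_take_succ tab k hk

theorem psums_append (t : List Int) (x : Int) :
    psums (t ++ [x]) = psums t ++ [psum t t.length + x] := by
  unfold psums
  rw [List.length_append, List.length_singleton,
      show t.length + 1 + 1 = (t.length + 1) + 1 from rfl, List.range_succ, List.map_append]
  congr 1
  · apply List.map_congr_left
    intro k hk
    simp only [List.mem_range] at hk
    unfold psum
    rw [List.take_append_of_le_length (by omega)]
  · simp only [List.map_cons, List.map_nil]
    congr 1
    unfold psum
    rw [List.take_of_length_le (by simp), List.take_of_length_le (le_refl t.length)]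
    simp

theorem psums_getLastD (t : List Int) : (psums t).getLastD 0 = psum t t.length := by
  have hlen : (psums t).length = t.length + 1 := by simp [psums]
  rw [List.getLastD_eq_getLast?, List.getLast?_eq_getElem?]
  rw [hlen, show t.length + 1 - 1 = t.length from by omega]
  have := psums_getD t t.length (le_refl _)
  rw [List.getD_eq_getElem?_getD, List.getElem?_eq_getElem (by omega)] at this
  rw [List.getElem?_eq_getElem (by omega)]
  simpa using this

theorem foldP_eq_psums (tab : List Int) :
    tab.foldl (fun (P : List Int) x => P ++ [P.getLastD 0 + x]) [0] = psums tab := by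
  induction tab using List.reverseRecOn with
  | nil => simp [psums, psum]
  | append_singleton t x ih =>
      rw [List.foldl_append, List.foldl_cons, List.foldl_nil, ih, psums_append, psums_getLastD]

-- ---------- min-fold characterisation ----------
theorem intMinFold_le_iff {α : Type} (L : List α) (f : α → Int) (c v : Int) :
    (L.foldl (fun c x => min (f x) c) c ≤ v) ↔ (c ≤ v ∨ ∃ x ∈ L, f x ≤ v) := by
  induction L generalizing c with
  | nil => simp
  | cons h t ih =>
      simp only [List.foldl_cons, ih, List.mem_cons]
      constructor
      · rintro (hc | hx)
        · rcases le_or_gt (f h) c with h1 | h1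
          · exact Or.inr ⟨h, Or.inl rfl, by simpa [min_def, h1] using hc⟩
          · exact Or.inl (by simp only [min_def] at hc; omega)
        · obtain ⟨x, hx1, hx2⟩ := hx
          exact Or.inr ⟨x, Or.inr hx1, hx2⟩
      · rintro (hc | ⟨x, (rfl | hx1), hx2⟩)
        · exact Or.inl (le_trans (min_le_right _ _) hc)
        · exact Or.inl (le_trans (min_le_left _ _) hx2)
        · exact Or.inr ⟨x, hx1, hx2⟩

theorem intMinFold_attained {α : Type} (L : List α) (f : α → Int) (c : Int) :
    (L.foldl (fun c x => min (f x) c) c = c) ∨ ∃ x ∈ L, L.foldl (fun c x => min (f x) c) c = f x := by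
  induction L generalizing c with
  | nil => simp
  | cons h t ih =>
      simp only [List.foldl_cons, List.mem_cons]
      rcases ih (min (f h) c) with h1 | ⟨x, hx1, hx2⟩
      · rcases min_choice (f h) c with h2 | h2
        · exact Or.inr ⟨h, Or.inl rfl, by rw [h1, h2]⟩
        · exact Or.inl (by rw [h1, h2])
      · exact Or.inr ⟨x, Or.inr hx1, hx2⟩

theorem foldl_oMin_some {α : Type} (L : List α) (f : α → Int) (c : Int) :
    L.foldl (fun m x => oMin (some (f x)) m) (some c)
      = some (L.foldl (fun c x => min (f x) c) c) := by
  induction L generalizing c with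
  | nil => rfl
  | cons h t ih =>
      rw [List.foldl_cons, show oMin (some (f h)) (some c) = some (min (f h) c) from rfl,
        List.foldl_cons]
      exact ih (min (f h) c)

theorem foldl_oMin_none_le_iff {α : Type} (L : List α) (f : α → Int) (v : Int) (hL : L ≠ []) :
    ((L.foldl (fun m x => oMin (some (f x)) m) none).getD 0 ≤ v) ↔ ∃ x ∈ L, f x ≤ v := by
  match L with
  | h :: t =>
      simp only [List.foldl_cons, show oMin (some (f h)) none = some (f h) from rfl,
        foldl_oMin_some, Option.getD_some, intMinFold_le_iff, List.mem_cons]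
      constructor
      · rintro (hc | ⟨x, hx1, hx2⟩)
        · exact ⟨h, Or.inl rfl, hc⟩
        · exact ⟨x, Or.inr hx1, hx2⟩
      · rintro ⟨x, (rfl | hx1), hx2⟩
        · exact Or.inl hx2
        · exact Or.inr ⟨x, hx1, hx2⟩

theorem foldl_oMin_none_attained {α : Type} (L : List α) (f : α → Int) (hL : L ≠ []) :
    ∃ x ∈ L, (L.foldl (fun m x => oMin (some (f x)) m) none).getD 0 = f x := by
  match L with
  | h :: t =>
      simp only [List.foldl_cons, show oMin (some (f h)) none = some (f h) from rfl,
        foldl_oMin_some, Option.getD_some, List.mem_cons]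
      rcases intMinFold_attained t f (f h) with h1 | ⟨x, hx1, hx2⟩
      · exact ⟨h, Or.inl rfl, h1⟩
      · exact ⟨x, Or.inr hx1, hx2⟩

-- ---------- characterisation of the reference recurrence ----------
theorem gR_fold (P : List Int) (a b : Nat) (h : ¬ b ≤ a + 2) :
    gR P a b = ((List.range (b - a - 1)).foldl
      (fun (m : Option Int) l =>
        oMin (some (max (gR P (a + l + 1) b)
                        (max (gR P a (a + l + 1)) |P.getD b 0 - P.getD a 0|))) m) none).getD 0 := by
  rw [gR, if_neg h,
    List.foldl_attach (f := fun (m : Option Int) l =>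
      oMin (some (max (gR P (a + l + 1) b)
        (max (gR P a (a + l + 1)) |P.getD b 0 - P.getD a 0|))) m)]

theorem gR_le_iff (P : List Int) (a b : Nat) (v : Int) :
    gR P a b ≤ v ↔ |P.getD b 0 - P.getD a 0| ≤ v ∧
      (b ≤ a + 2 ∨ ∃ c, a < c ∧ c < b ∧ gR P a c ≤ v ∧ gR P c b ≤ v) := by
  by_cases h : b ≤ a + 2
  · rw [gR, if_pos h]; simp [h]
  · rw [gR_fold P a b h,
      foldl_oMin_none_le_iff _ _ _ (by simp [List.range_eq_nil]; omega)]
    constructor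
    · rintro ⟨l, hl, hle⟩
      simp only [List.mem_range] at hl
      simp only [max_le_iff] at hle
      exact ⟨hle.2.2, Or.inr ⟨a + l + 1, by omega, by omega, hle.2.1, hle.1⟩⟩
    · rintro ⟨hs, (h2 | ⟨c, hc1, hc2, hc3, hc4⟩)⟩
      · omega
      · refine ⟨c - a - 1, by simp [List.mem_range]; omega, ?_⟩
        have : a + (c - a - 1) + 1 = c := by omega
        rw [this]
        simp only [max_le_iff]
        exact ⟨hc4, hc3, hs⟩

theorem gR_attained (P : List Int) (n : Nat) :
    ∀ (k a b : Nat), b - a ≤ k → a < b → b ≤ n →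
      ∃ x y, x < y ∧ y ≤ n ∧ gR P a b = |P.getD y 0 - P.getD x 0| := by
  intro k
  induction k with
  | zero => intro a b h1 h2 _; omega
  | succ k ih =>
      intro a b h1 h2 h3
      by_cases h : b ≤ a + 2
      · exact ⟨a, b, h2, h3, by rw [gR, if_pos h]⟩
      · obtain ⟨l, hl, heq⟩ := foldl_oMin_none_attained
          ((List.range (b - a - 1)))
          (fun l => max (gR P (a + l + 1) b) (max (gR P a (a + l + 1)) |P.getD b 0 - P.getD a 0|))
          (by simp [List.range_eq_nil]; omega)
        rw [← gR_fold P a b h] at heq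
        simp only [List.mem_range] at hl
        obtain ⟨x1, y1, hxy1, hy1, he1⟩ := ih (a + l + 1) b (by omega) (by omega) h3
        obtain ⟨x2, y2, hxy2, hy2, he2⟩ := ih a (a + l + 1) (by omega) (by omega) (by omega)
        rcases max_choice (gR P (a + l + 1) b) (max (gR P a (a + l + 1)) |P.getD b 0 - P.getD a 0|)
          with hm | hm
        · exact ⟨x1, y1, hxy1, hy1, by rw [heq, hm, he1]⟩
        · rcases max_choice (gR P a (a + l + 1)) |P.getD b 0 - P.getD a 0| with hm2 | hm2
          · exact ⟨x2, y2, hxy2, hy2, by rw [heq, hm, hm2, he2]⟩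
          · exact ⟨a, b, h2, h3, by rw [heq, hm, hm2]⟩

-- ---------- bit-level lemmas ----------
theorem getD_replicate_zero (k i : Nat) : (List.replicate k (0 : Nat)).getD i 0 = 0 := by
  rcases lt_or_ge i k with h | h
  · simp [List.getD, h]
  · rw [List.getD_eq_default]; simpa

theorem testBit_or_shift (x i j : Nat) :
    (x ||| 1 <<< i).testBit j = (x.testBit j || decide (i = j)) := by
  rw [Nat.testBit_or, Nat.shiftLeft_eq, one_mul, Nat.testBit_two_pow]

theorem and_ne_zero_iff (x y : Nat) :
    x &&& y ≠ 0 ↔ ∃ i, x.testBit i ∧ y.testBit i := by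
  constructor
  · intro h
    obtain ⟨i, hi⟩ := Nat.exists_testBit_of_ne_zero h
    rw [Nat.testBit_and, Bool.and_eq_true] at hi
    exact ⟨i, hi⟩
  · rintro ⟨i, h1, h2⟩ h0
    have := Nat.testBit_and x y i
    rw [h0, Nat.zero_testBit, h1, h2] at this
    simp at this

theorem testBit_as_shift (m i : Nat) : (((m >>> i) &&& 1) == 1) = m.testBit i := by
  rw [Nat.testBit, Nat.and_comm 1 (m >>> i), Nat.and_one_is_mod]
  rcases Nat.mod_two_eq_zero_or_one (m >>> i) with h | h <;> simp [h]

-- ---------- feasibility: the bitmask tables compute gR ≤ v ----------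
-- pair (a,b) has been processed when its gap is < L, or = L with left endpoint < A
abbrev procPair (n L A a b : Nat) : Prop :=
  a < b ∧ b ≤ n ∧ (b - a < L ∨ (b - a = L ∧ a < A))

def BInv (P : List Int) (n : Nat) (v : Int) (FT : List Nat × List Nat) (L A : Nat) : Prop :=
  FT.1.length = n + 1 ∧ FT.2.length = n + 1 ∧
  (∀ a b : Nat, (FT.1.getD a 0).testBit b = decide (procPair n L A a b ∧ gR P a b ≤ v)) ∧
  (∀ a b : Nat, (FT.2.getD b 0).testBit a = decide (procPair n L A a b ∧ gR P a b ≤ v))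

theorem feas_cond_iff (P : List Int) (n : Nat) (v : Int) (FT : List Nat × List Nat)
    (L A : Nat) (hI : BInv P n v FT L A) (hL : 1 ≤ L) (hb : A + L ≤ n) :
    (|P.getD (A + L) 0 - P.getD A 0| ≤ v ∧
      (L ≤ 2 ∨ (FT.1.getD A 0) &&& (FT.2.getD (A + L) 0) ≠ 0))
      ↔ gR P A (A + L) ≤ v := by
  obtain ⟨h1, h2, hF, hT⟩ := hI
  rw [gR_le_iff P A (A + L) v]
  constructor
  · rintro ⟨hs, (h3 | h3)⟩
    · exact ⟨hs, Or.inl (by omega)⟩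
    · rw [and_ne_zero_iff] at h3
      obtain ⟨m, hm1, hm2⟩ := h3
      rw [hF A m, decide_eq_true_iff] at hm1
      rw [hT m (A + L), decide_eq_true_iff] at hm2
      obtain ⟨⟨hp1, hp2, hp3⟩, hg1⟩ := hm1
      obtain ⟨⟨hq1, hq2, hq3⟩, hg2⟩ := hm2
      exact ⟨hs, Or.inr ⟨m, by omega, by omega, hg1, hg2⟩⟩
  · rintro ⟨hs, (h3 | ⟨c, hc1, hc2, hc3, hc4⟩)⟩
    · exact ⟨hs, Or.inl (by omega)⟩
    · refine ⟨hs, Or.inr ?_⟩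
      rw [and_ne_zero_iff]
      refine ⟨c, ?_, ?_⟩
      · rw [hF A c, decide_eq_true_iff]
        exact ⟨⟨hc1, by omega, by omega⟩, hc3⟩
      · rw [hT c (A + L), decide_eq_true_iff]
        exact ⟨⟨hc2, by omega, by omega⟩, hc4⟩

theorem feas_step (P : List Int) (n : Nat) (v : Int) (FT : List Nat × List Nat)
    (L A : Nat) (hI : BInv P n v FT L A) (hL : 1 ≤ L) (hb : A + L ≤ n) :
    BInv P n v
      (if |P.getD (A + L) 0 - P.getD A 0| ≤ v ∧
          (L ≤ 2 ∨ (FT.1.getD A 0) &&& (FT.2.getD (A + L) 0) ≠ 0)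
       then (FT.1.set A ((FT.1.getD A 0) ||| (1 <<< (A + L))),
             FT.2.set (A + L) ((FT.2.getD (A + L) 0) ||| (1 <<< A)))
       else FT) L (A + 1) := by
  have hcond := feas_cond_iff P n v FT L A hI hL hb
  obtain ⟨h1, h2, hF, hT⟩ := hI
  have hproc : ∀ a b : Nat, ¬ (b = A + L ∧ a = A) →
      (procPair n L (A + 1) a b ↔ procPair n L A a b) := by
    intro a b hne
    unfold procPair
    constructor
    · rintro ⟨u1, u2, (u3 | ⟨u3, u4⟩)⟩
      · exact ⟨u1, u2, Or.inl u3⟩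
      · refine ⟨u1, u2, Or.inr ⟨u3, ?_⟩⟩
        rcases Nat.lt_succ_iff_lt_or_eq.mp u4 with h | h
        · exact h
        · exfalso; exact hne ⟨by omega, h⟩
    · rintro ⟨u1, u2, (u3 | ⟨u3, u4⟩)⟩
      · exact ⟨u1, u2, Or.inl u3⟩
      · exact ⟨u1, u2, Or.inr ⟨u3, by omega⟩⟩
  split_ifs with hc
  · have hg : gR P A (A + L) ≤ v := hcond.mp hc
    refine ⟨by simpa using h1, by simpa using h2, ?_, ?_⟩
    · intro a b
      simp only
      by_cases ha : a = A
      · subst ha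
        rw [getD_set_self _ _ _ _ (by omega), testBit_or_shift, hF a b]
        by_cases hab : a + L = b
        · rw [show decide (a + L = b) = true from decide_eq_true hab, Bool.or_true]
          symm
          rw [decide_eq_true_iff]
          exact ⟨⟨by omega, by omega, Or.inr ⟨by omega, by omega⟩⟩, hab ▸ hg⟩
        · rw [show decide (a + L = b) = false from decide_eq_false hab, Bool.or_false,
            decide_eq_decide]
          exact and_congr_left' ((hproc a b (by rintro ⟨h', -⟩; exact hab h'.symm)).symm)
      · rw [getD_set_ne _ _ _ _ _ ha, hF a b, decide_eq_decide]
        exact and_congr_left' ((hproc a b (by rintro ⟨-, h'⟩; exact ha h')).symm)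
    · intro a b
      simp only
      by_cases hbe : b = A + L
      · subst hbe
        rw [getD_set_self _ _ _ _ (by omega), testBit_or_shift, hT a (A + L)]
        by_cases haa : A = a
        · rw [show decide (A = a) = true from decide_eq_true haa, Bool.or_true]
          symm
          rw [decide_eq_true_iff]
          exact ⟨⟨by omega, by omega, Or.inr ⟨by omega, by omega⟩⟩, haa ▸ hg⟩
        · rw [show decide (A = a) = false from decide_eq_false haa, Bool.or_false,
            decide_eq_decide]
          exact and_congr_left' ((hproc a (A + L) (by rintro ⟨-, h'⟩; exact haa h'.symm)).symm)
      · rw [getD_set_ne _ _ _ _ _ hbe, hT a b, decide_eq_decide]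
        exact and_congr_left' ((hproc a b (by rintro ⟨h', -⟩; exact hbe h')).symm)
  · have hg : ¬ gR P A (A + L) ≤ v := fun h => hc (hcond.mpr h)
    refine ⟨h1, h2, ?_, ?_⟩
    · intro a b
      rw [hF a b, decide_eq_decide]
      by_cases hne : b = A + L ∧ a = A
      · obtain ⟨rfl, rfl⟩ := hne
        exact ⟨fun h' => absurd h'.2 hg, fun h' => absurd h'.2 hg⟩
      · exact and_congr_left' ((hproc a b hne).symm)
    · intro a b
      rw [hT a b, decide_eq_decide]
      by_cases hne : b = A + L ∧ a = A
      · obtain ⟨rfl, rfl⟩ := hne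
        exact ⟨fun h' => absurd h'.2 hg, fun h' => absurd h'.2 hg⟩
      · exact and_congr_left' ((hproc a b hne).symm)

theorem BInv_init (P : List Int) (n : Nat) (v : Int) :
    BInv P n v (List.replicate (n + 1) 0, List.replicate (n + 1) 0) 1 0 := by
  refine ⟨by simp, by simp, ?_, ?_⟩ <;>
    · intro a b
      rw [getD_replicate_zero, Nat.zero_testBit]
      symm
      rw [decide_eq_false_iff_not]
      rintro ⟨⟨h1, h2, h3⟩, -⟩
      omega

theorem BInv_roll (P : List Int) (n : Nat) (v : Int) (FT : List Nat × List Nat) (L : Nat)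
    (h : BInv P n v FT L (n - L + 1)) : BInv P n v FT (L + 1) 0 := by
  obtain ⟨h1, h2, hF, hT⟩ := h
  refine ⟨h1, h2, ?_, ?_⟩
  · intro a b
    rw [hF a b, decide_eq_decide]
    exact and_congr_left' (by unfold procPair; omega)
  · intro a b
    rw [hT a b, decide_eq_decide]
    exact and_congr_left' (by unfold procPair; omega)

theorem feasible_eq (P : List Int) (n : Nat) (v : Int) (hn : 1 ≤ n) :
    feasible P n v = decide (gR P 0 n ≤ v) := by
  unfold feasible
  dsimp only
  rw [foldl_natRange]
  have hmain : BInv P n v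
      ((List.range (n + 1 - 1)).foldl
        (fun t k =>
          (fun (FT : List Nat × List Nat) len =>
            List.foldl
              (fun (FT : List Nat × List Nat) a =>
                if |P.getD (a + len) 0 - P.getD a 0| ≤ v ∧
                    (len ≤ 2 ∨ FT.1.getD a 0 &&& FT.2.getD (a + len) 0 ≠ 0) then
                  (FT.1.set a (FT.1.getD a 0 ||| 1 <<< (a + len)),
                    FT.2.set (a + len) (FT.2.getD (a + len) 0 ||| 1 <<< a))
                else FT)
              FT (List.range (n - len + 1))) t (1 + k))
        (List.replicate (n + 1) 0, List.replicate (n + 1) 0)) (n + 1 - 1 + 1) 0 := by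
    apply foldl_range_inv
      (Inv := fun FT k => BInv P n v FT (k + 1) 0)
    · exact BInv_init P n v
    · intro t k hk hIk
      dsimp only
      have hstep := foldl_range_inv
        (f := fun (FT : List Nat × List Nat) a =>
          if |P.getD (a + (1 + k)) 0 - P.getD a 0| ≤ v ∧
              ((1 + k) ≤ 2 ∨ FT.1.getD a 0 &&& FT.2.getD (a + (1 + k)) 0 ≠ 0) then
            (FT.1.set a (FT.1.getD a 0 ||| 1 <<< (a + (1 + k))),
              FT.2.set (a + (1 + k)) (FT.2.getD (a + (1 + k)) 0 ||| 1 <<< a))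
          else FT)
        (n - (1 + k) + 1)
        (Inv := fun FT A => BInv P n v FT (1 + k) A) t
        (by rwa [show 1 + k = k + 1 from Nat.add_comm 1 k])
        (fun t' A hA hI' => by
          have := feas_step P n v t' (1 + k) A hI' (by omega) (by omega)
          simpa [Nat.add_comm A (1 + k)] using this)
      have := BInv_roll P n v _ (1 + k) hstep
      rwa [show 1 + k + 1 = k + 1 + 1 from by omega] at this
  rw [testBit_as_shift, hmain.2.2.1 0 n, decide_eq_decide]
  constructor
  · exact fun h => h.2
  · exact fun h => ⟨⟨hn, le_refl n, by omega⟩, h⟩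

-- ---------- A-side: table infrastructure ----------
def RowLen (m : List (List (Option Int))) (n : Nat) : Prop :=
  m.length = n ∧ ∀ i, i < n → (m.getD i []).length = n

theorem rowLen_replicate (n : Nat) :
    RowLen (List.replicate n (List.replicate n (none : Option Int))) n := by
  refine ⟨by simp, fun i h => ?_⟩
  simp [List.getD, h]

theorem rowLen_set2 {m : List (List (Option Int))} {n : Nat} (h : RowLen m n)
    (i j : Nat) (v : Option Int) : RowLen (set2 m i j v) n := by
  obtain ⟨h1, h2⟩ := h
  refine ⟨by simp [set2, h1], fun i' hi' => ?_⟩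
  by_cases he : i' = i
  · subst he
    rcases lt_or_ge i' m.length with hin | hin
    · rw [set2, getD_set_self _ _ _ _ hin, List.length_set]
      exact h2 i' hi'
    · rw [set2, List.set_eq_of_length_le hin]
      exact h2 i' hi'
  · rw [set2, getD_set_ne _ _ _ _ _ he]
    exact h2 i' hi'

theorem get2_set2_self {m : List (List (Option Int))} {n : Nat} (h : RowLen m n)
    (i j : Nat) (v : Option Int) (hi : i < n) (hj : j < n) :
    get2 (set2 m i j v) i j = v := by
  obtain ⟨h1, h2⟩ := h
  rw [get2, set2, getD_set_self _ _ _ _ (by omega), getD_set_self _ _ _ _ (by rw [h2 i hi]; exact hj)]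

theorem get2_set2_ne {m : List (List (Option Int))} (i j : Nat) (v : Option Int)
    (i' j' : Nat) (h : ¬ (i' = i ∧ j' = j)) :
    get2 (set2 m i j v) i' j' = get2 m i' j' := by
  by_cases he : i' = i
  · subst he
    have hj : j' ≠ j := fun hh => h ⟨rfl, hh⟩
    rcases lt_or_ge i' m.length with hin | hin
    · rw [get2, set2, getD_set_self _ _ _ _ hin, getD_set_ne _ _ _ _ _ hj]
      rfl
    · rw [get2, set2, List.set_eq_of_length_le hin]
      rfl
  · rw [get2, set2, getD_set_ne _ _ _ _ _ he]
    rfl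

-- ---------- A-side: the three table-building stages as named terms ----------
def Stab (tab : List Int) : List (List (Option Int)) :=
  (List.range tab.length).foldl
    (fun S a => (natRange (a + 1) tab.length).foldl
      (fun S b => set2 S a b (oAdd (get2 S a (b - 1)) (tab.getD b 0))) S)
    ((List.range tab.length).foldl (fun S i => set2 S i i (some (tab.getD i 0)))
      (List.replicate tab.length (List.replicate tab.length none)))

def Fb (tab : List Int) : List (List (Option Int)) :=
  (List.range (tab.length - 1)).foldl
    (fun F i => set2 F i (i + 1) (some |tab.getD i 0 + tab.getD (i + 1) 0|))
    ((List.range tab.length).foldl (fun F i => set2 F i i (some |tab.getD i 0|))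
      (List.replicate tab.length (List.replicate tab.length none)))

def Ffin (tab : List Int) : List (List (Option Int)) :=
  (natRange 1 tab.length).foldl (fun F j =>
    ((List.range (j - 1)).reverse).foldl (fun F i =>
      (List.range (j - i)).foldl (fun F l =>
        set2 F i j (oMin (oMax (get2 F (i + l + 1) j)
          (oMax (get2 F i (i + l)) (oAbs (get2 (Stab tab) i j)))) (get2 F i j))) F) F) (Fb tab)

theorem optA_unfold (tab : List Int) :
    opt_sum tab = (get2 (Ffin tab) 0 (tab.length - 1)).getD 0 := rfl

theorem get2_replicate (n i j : Nat) :
    get2 (List.replicate n (List.replicate n (none : Option Int))) i j = none := by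
  unfold get2
  rcases lt_or_ge i n with h | h
  · rw [show (List.replicate n (List.replicate n (none : Option Int))).getD i []
        = List.replicate n none from by
      rw [List.getD_eq_getElem _ _ (by simpa using h)]; simp]
    rcases lt_or_ge j n with h' | h'
    · rw [List.getD_eq_getElem _ _ (by simpa using h')]; simp
    · rw [List.getD_eq_default _ _ (by simpa using h')]
  · rw [show (List.replicate n (List.replicate n (none : Option Int))).getD i []
        = [] from List.getD_eq_default _ _ (by simpa using h)]
    rfl

theorem Stab_spec (tab : List Int) :
    RowLen (Stab tab) tab.length ∧
    ∀ a b, a ≤ b → b < tab.length →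
      get2 (Stab tab) a b = some (psum tab (b + 1) - psum tab a) := by
  set n := tab.length with hn
  have hdiag : ∀ k, k < n → (some (tab.getD k 0) : Option Int)
      = some (psum tab (k + 1) - psum tab k) := by
    intro k hk
    rw [psum_succ tab k hk]
    ring_nf
  have h1 : ∀ (S1 : List (List (Option Int))),
      S1 = (List.range n).foldl (fun S i => set2 S i i (some (tab.getD i 0)))
        (List.replicate n (List.replicate n none)) →
      RowLen S1 n ∧ ∀ i j, i < n → j < n →
        get2 S1 i j = if i = j then some (tab.getD i 0) else none := by
    intro S1 hS1
    subst hS1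
    have := foldl_range_inv (f := fun S i => set2 S i i (some (tab.getD i 0))) n
      (Inv := fun S k => RowLen S n ∧ ∀ i j, i < n → j < n →
        get2 S i j = if i = j ∧ i < k then some (tab.getD i 0) else none)
      (List.replicate n (List.replicate n none))
      ⟨rowLen_replicate n, fun i j hi hj => by
        rw [get2_replicate, if_neg (by omega)]⟩
      (fun t k hk ht => by
        refine ⟨rowLen_set2 ht.1 _ _ _, fun i j hi hj => ?_⟩
        by_cases he : i = k ∧ j = k
        · obtain ⟨rfl, rfl⟩ := he
          rw [get2_set2_self ht.1 _ _ _ hi hj, if_pos ⟨rfl, by omega⟩]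
        · rw [get2_set2_ne _ _ _ _ _ he, ht.2 i j hi hj]
          exact if_congr (by omega) rfl rfl)
    refine ⟨this.1, fun i j hi hj => ?_⟩
    rw [this.2 i j hi hj]
    exact if_congr (by omega) rfl rfl
  obtain ⟨hRL1, hE1⟩ := h1 _ rfl
  have hmain : RowLen (Stab tab) n ∧
      (∀ i, i < n → get2 (Stab tab) i i = some (tab.getD i 0)) ∧
      (∀ a b, a < n → a < b → b < n →
        get2 (Stab tab) a b = some (psum tab (b + 1) - psum tab a)) := by
    rw [Stab, ← hn]
    have := foldl_range_inv
      (f := fun S a => (natRange (a + 1) n).foldl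
        (fun S b => set2 S a b (oAdd (get2 S a (b - 1)) (tab.getD b 0))) S) n
      (Inv := fun S A => RowLen S n ∧
        (∀ i, i < n → get2 S i i = some (tab.getD i 0)) ∧
        (∀ a b, a < A → a < b → b < n →
          get2 S a b = some (psum tab (b + 1) - psum tab a)))
      ((List.range n).foldl (fun S i => set2 S i i (some (tab.getD i 0)))
        (List.replicate n (List.replicate n none)))
      ⟨hRL1, fun i hi => by rw [hE1 i i hi hi, if_pos rfl], fun a b h _ _ => by omega⟩
      (fun t A hA ht => by
        dsimp only
        rw [foldl_natRange]
        have hin := foldl_range_inv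
          (f := fun S k => set2 S A (A + 1 + k)
            (oAdd (get2 S A (A + 1 + k - 1)) (tab.getD (A + 1 + k) 0)))
          (n - (A + 1))
          (Inv := fun S t => RowLen S n ∧
            (∀ i, i < n → get2 S i i = some (tab.getD i 0)) ∧
            (∀ a b, a < A → a < b → b < n →
              get2 S a b = some (psum tab (b + 1) - psum tab a)) ∧
            (∀ b', A < b' → b' < A + 1 + t →
              get2 S A b' = some (psum tab (b' + 1) - psum tab A))) t
          ⟨ht.1, ht.2.1, ht.2.2, fun b' h1' h2' => by omega⟩
          (fun t' k hk ht' => by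
            have hb : A + 1 + k < n := by omega
            have hread : get2 t' A (A + 1 + k - 1)
                = some (psum tab (A + k + 1) - psum tab A) := by
              rcases Nat.eq_zero_or_pos k with rfl | hkpos
              · have hd := ht'.2.1 A (by omega)
                rw [show A + 1 + 0 - 1 = A from by omega, hd, hdiag A (by omega)]
              · rw [show A + 1 + k - 1 = A + k from by omega]
                rw [ht'.2.2.2 (A + k) (by omega) (by omega)]
            refine ⟨rowLen_set2 ht'.1 _ _ _, fun i hi => ?_, fun a b h1' h2' h3' => ?_,
              fun b' hb1 hb2 => ?_⟩
            · rw [get2_set2_ne _ _ _ _ _ (by omega), ht'.2.1 i hi]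
            · rw [get2_set2_ne _ _ _ _ _ (by omega), ht'.2.2.1 a b h1' h2' h3']
            · by_cases he : b' = A + 1 + k
              · subst he
                rw [get2_set2_self ht'.1 _ _ _ (by omega) hb, hread]
                simp only [oAdd, Option.map_some]
                rw [psum_succ tab (A + 1 + k) hb, show A + k + 1 = A + 1 + k from by omega]
                congr 1
                ring
              · rw [get2_set2_ne _ _ _ _ _ (by omega)]
                exact ht'.2.2.2 b' hb1 (by omega))
        exact ⟨hin.1, hin.2.1, fun a b h1' h2' h3' => by
          rcases Nat.lt_succ_iff_lt_or_eq.mp h1' with h | rfl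
          · exact hin.2.2.1 a b h h2' h3'
          · exact hin.2.2.2 b h2' (by omega)⟩)
    exact ⟨this.1, this.2.1, this.2.2⟩
  refine ⟨hmain.1, fun a b hab hbn => ?_⟩
  rcases Nat.eq_or_lt_of_le hab with rfl | hlt
  · rw [hmain.2.1 a hbn, hdiag a hbn]
  · exact hmain.2.2 a b (by omega) hlt hbn

theorem gR_len1 (tab : List Int) (i : Nat) (hi : i < tab.length) :
    gR (psums tab) i (i + 1) = |tab.getD i 0| := by
  rw [gR, if_pos (by omega), psums_getD tab (i + 1) (by omega), psums_getD tab i (by omega),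
    psum_succ tab i hi]
  ring_nf

theorem gR_len2 (tab : List Int) (i : Nat) (hi : i + 1 < tab.length) :
    gR (psums tab) i (i + 2) = |tab.getD i 0 + tab.getD (i + 1) 0| := by
  rw [gR, if_pos (by omega), psums_getD tab (i + 2) (by omega), psums_getD tab i (by omega),
    show i + 2 = (i + 1) + 1 from rfl, psum_succ tab (i + 1) hi, psum_succ tab i (by omega)]
  ring_nf

theorem Fb_spec (tab : List Int) :
    RowLen (Fb tab) tab.length ∧
    ∀ i j, i ≤ j → j < tab.length →
      get2 (Fb tab) i j
        = if j ≤ i + 1 then some (gR (psums tab) i (j + 1)) else none := by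
  set n := tab.length with hn
  have h1 : ∀ (F1 : List (List (Option Int))),
      F1 = (List.range n).foldl (fun F i => set2 F i i (some |tab.getD i 0|))
        (List.replicate n (List.replicate n none)) →
      RowLen F1 n ∧ ∀ i j, i < n → j < n →
        get2 F1 i j = if i = j then some |tab.getD i 0| else none := by
    intro F1 hF1
    subst hF1
    have := foldl_range_inv (f := fun F i => set2 F i i (some |tab.getD i 0|)) n
      (Inv := fun F k => RowLen F n ∧ ∀ i j, i < n → j < n →
        get2 F i j = if i = j ∧ i < k then some |tab.getD i 0| else none)
      (List.replicate n (List.replicate n none))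
      ⟨rowLen_replicate n, fun i j hi hj => by
        rw [get2_replicate, if_neg (by omega)]⟩
      (fun t k hk ht => by
        refine ⟨rowLen_set2 ht.1 _ _ _, fun i j hi hj => ?_⟩
        by_cases he : i = k ∧ j = k
        · obtain ⟨rfl, rfl⟩ := he
          rw [get2_set2_self ht.1 _ _ _ hi hj, if_pos ⟨rfl, by omega⟩]
        · rw [get2_set2_ne _ _ _ _ _ he, ht.2 i j hi hj]
          exact if_congr (by omega) rfl rfl)
    refine ⟨this.1, fun i j hi hj => ?_⟩
    rw [this.2 i j hi hj]
    exact if_congr (by omega) rfl rfl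
  obtain ⟨hRL1, hE1⟩ := h1 _ rfl
  have hmain : RowLen (Fb tab) n ∧ ∀ i j, i < n → j < n →
      get2 (Fb tab) i j = if i = j then some |tab.getD i 0|
        else if j = i + 1 then some |tab.getD i 0 + tab.getD j 0| else none := by
    rw [Fb, ← hn]
    have := foldl_range_inv
      (f := fun F i => set2 F i (i + 1) (some |tab.getD i 0 + tab.getD (i + 1) 0|)) (n - 1)
      (Inv := fun F k => RowLen F n ∧ ∀ i j, i < n → j < n →
        get2 F i j = if i = j then some |tab.getD i 0|
          else if j = i + 1 ∧ i < k then some |tab.getD i 0 + tab.getD j 0| else none)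
      ((List.range n).foldl (fun F i => set2 F i i (some |tab.getD i 0|))
        (List.replicate n (List.replicate n none)))
      ⟨hRL1, fun i j hi hj => by
        rw [hE1 i j hi hj]
        by_cases he : i = j
        · rw [if_pos he, if_pos he]
        · rw [if_neg he, if_neg he, if_neg (by omega)]⟩
      (fun t k hk ht => by
        refine ⟨rowLen_set2 ht.1 _ _ _, fun i j hi hj => ?_⟩
        by_cases he : i = k ∧ j = k + 1
        · obtain ⟨rfl, rfl⟩ := he
          rw [get2_set2_self ht.1 _ _ _ hi hj, if_neg (by omega), if_pos ⟨rfl, by omega⟩]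
        · rw [get2_set2_ne _ _ _ _ _ he, ht.2 i j hi hj]
          by_cases hij : i = j
          · rw [if_pos hij, if_pos hij]
          · rw [if_neg hij, if_neg hij]
            exact if_congr (by omega) rfl rfl)
    refine ⟨this.1, fun i j hi hj => ?_⟩
    rw [this.2 i j hi hj]
    by_cases hij : i = j
    · rw [if_pos hij, if_pos hij]
    · rw [if_neg hij, if_neg hij]
      exact if_congr (by omega) rfl rfl
  refine ⟨hmain.1, fun i j hij hjn => ?_⟩
  rw [hmain.2 i j (by omega) hjn]
  by_cases he : i = j
  · subst he
    rw [if_pos rfl, if_pos (by omega), gR_len1 tab i hjn]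
  · rw [if_neg he]
    by_cases he2 : j = i + 1
    · subst he2
      rw [if_pos rfl, if_pos (by omega), show i + 1 + 1 = i + 2 from rfl, gR_len2 tab i hjn]
    · rw [if_neg (by omega), if_neg (by omega)]

theorem foldl_oMin_none_some {α : Type} (L : List α) (f : α → Int) (hL : L ≠ []) :
    L.foldl (fun m x => oMin (some (f x)) m) none
      = some ((L.foldl (fun m x => oMin (some (f x)) m) none).getD 0) := by
  match L with
  | h :: t =>
      rw [List.foldl_cons, show oMin (some (f h)) none = some (f h) from rfl,
        foldl_oMin_some, Option.getD_some]

def doneF (tab : List Int) (F : List (List (Option Int))) (J : Nat) : Prop :=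
  ∀ i j, i ≤ j → j < tab.length → (j ≤ i + 1 ∨ j < J) →
    get2 F i j = some (gR (psums tab) i (j + 1))

theorem inner_step (tab : List Int) (S F : List (List (Option Int))) (i j : Nat)
    (hij : i + 2 ≤ j) (hjn : j < tab.length)
    (hRL : RowLen F tab.length)
    (hS : get2 S i j = some (psum tab (j + 1) - psum tab i))
    (hcolj : ∀ r, i < r → r ≤ j → get2 F r j = some (gR (psums tab) r (j + 1)))
    (hrow : ∀ q, i ≤ q → q < j → get2 F i q = some (gR (psums tab) i (q + 1)))
    (hij0 : get2 F i j = none) :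
    RowLen ((List.range (j - i)).foldl (fun F l =>
        set2 F i j (oMin (oMax (get2 F (i + l + 1) j)
          (oMax (get2 F i (i + l)) (oAbs (get2 S i j)))) (get2 F i j))) F) tab.length ∧
    get2 ((List.range (j - i)).foldl (fun F l =>
        set2 F i j (oMin (oMax (get2 F (i + l + 1) j)
          (oMax (get2 F i (i + l)) (oAbs (get2 S i j)))) (get2 F i j))) F) i j
      = some (gR (psums tab) i (j + 1)) ∧
    ∀ p q, ¬ (p = i ∧ q = j) →
      get2 ((List.range (j - i)).foldl (fun F l =>
        set2 F i j (oMin (oMax (get2 F (i + l + 1) j)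
          (oMax (get2 F i (i + l)) (oAbs (get2 S i j)))) (get2 F i j))) F) p q = get2 F p q := by
  set n := tab.length with hn
  set P := psums tab with hP
  have hPj : P.getD (j + 1) 0 = psum tab (j + 1) := psums_getD tab (j + 1) (by omega)
  have hPi : P.getD i 0 = psum tab i := psums_getD tab i (by omega)
  have key := foldl_range_inv
    (f := fun F l => set2 F i j (oMin (oMax (get2 F (i + l + 1) j)
      (oMax (get2 F i (i + l)) (oAbs (get2 S i j)))) (get2 F i j))) (j - i)
    (Inv := fun G l => RowLen G n ∧
      (∀ p q, ¬ (p = i ∧ q = j) → get2 G p q = get2 F p q) ∧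
      get2 G i j = (List.range l).foldl (fun m t =>
        oMin (some (max (gR P (i + t + 1) (j + 1))
          (max (gR P i (i + t + 1)) |P.getD (j + 1) 0 - P.getD i 0|))) m) none) F
    ⟨hRL, fun p q _ => rfl, by rw [hij0]; rfl⟩
    (fun G l hl hG => by
      obtain ⟨hGRL, hGne, hGij⟩ := hG
      have hr1 : get2 G (i + l + 1) j = some (gR P (i + l + 1) (j + 1)) := by
        rw [hGne _ _ (by omega)]
        exact hcolj (i + l + 1) (by omega) (by omega)
      have hr2 : get2 G i (i + l) = some (gR P i (i + l + 1)) := by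
        rw [hGne _ _ (by omega)]
        exact hrow (i + l) (by omega) (by omega)
      refine ⟨rowLen_set2 hGRL _ _ _, fun p q hpq => ?_, ?_⟩
      · rw [get2_set2_ne _ _ _ _ _ hpq]
        exact hGne p q hpq
      · rw [get2_set2_self hGRL _ _ _ (by omega) (by omega), hr1, hr2, hS, hGij,
          List.range_succ, List.foldl_append, List.foldl_cons, List.foldl_nil]
        rw [show oAbs (some (psum tab (j + 1) - psum tab i))
            = some |P.getD (j + 1) 0 - P.getD i 0| from by rw [hPj, hPi]; rfl]
        rfl)
  refine ⟨key.1, ?_, key.2.1⟩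
  rw [key.2.2]
  have hne : List.range (j - i) ≠ [] := by simp [List.range_eq_nil]; omega
  have hgf := gR_fold P i (j + 1) (by omega)
  rw [show j + 1 - i - 1 = j - i from by omega] at hgf
  rw [foldl_oMin_none_some _ _ hne, ← hgf]

def freshF (tab : List Int) (F : List (List (Option Int))) (J : Nat) : Prop :=
  ∀ p q, p + 2 ≤ q → q < tab.length → J ≤ q → get2 F p q = none

theorem col_step (tab : List Int) (S F : List (List (Option Int))) (j : Nat)
    (hj1 : 1 ≤ j) (hjn : j < tab.length)
    (hS : ∀ a b, a ≤ b → b < tab.length → get2 S a b = some (psum tab (b + 1) - psum tab a))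
    (hRL : RowLen F tab.length) (hdone : doneF tab F j) (hfresh : freshF tab F j) :
    RowLen (((List.range (j - 1)).reverse).foldl (fun F i =>
        (List.range (j - i)).foldl (fun F l =>
          set2 F i j (oMin (oMax (get2 F (i + l + 1) j)
            (oMax (get2 F i (i + l)) (oAbs (get2 S i j)))) (get2 F i j))) F) F) tab.length ∧
    doneF tab (((List.range (j - 1)).reverse).foldl (fun F i =>
        (List.range (j - i)).foldl (fun F l =>
          set2 F i j (oMin (oMax (get2 F (i + l + 1) j)
            (oMax (get2 F i (i + l)) (oAbs (get2 S i j)))) (get2 F i j))) F) F) (j + 1) ∧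
    freshF tab (((List.range (j - 1)).reverse).foldl (fun F i =>
        (List.range (j - i)).foldl (fun F l =>
          set2 F i j (oMin (oMax (get2 F (i + l + 1) j)
            (oMax (get2 F i (i + l)) (oAbs (get2 S i j)))) (get2 F i j))) F) F) (j + 1) := by
  set n := tab.length with hn
  set P := psums tab with hP
  have key := foldl_range_rev_inv
    (f := fun F i => (List.range (j - i)).foldl (fun F l =>
      set2 F i j (oMin (oMax (get2 F (i + l + 1) j)
        (oMax (get2 F i (i + l)) (oAbs (get2 S i j)))) (get2 F i j))) F) (j - 1)
    (Inv := fun G k => RowLen G n ∧ doneF tab G j ∧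
      (∀ r, k ≤ r → r + 2 ≤ j → get2 G r j = some (gR P r (j + 1))) ∧
      (∀ r, r + 2 ≤ j → r < k → get2 G r j = none) ∧
      (∀ p q, p + 2 ≤ q → q < n → j < q → get2 G p q = none)) F
    ⟨hRL, hdone, fun r h1 h2 => by omega,
      fun r h1 h2 => hfresh r j h1 hjn (le_refl j),
      fun p q h1 h2 h3 => hfresh p q h1 h2 (by omega)⟩
    (fun t k hk hInv => by
      obtain ⟨h1, h2, h3, h4, h5⟩ := hInv
      have hst := inner_step tab S t k j (by omega) hjn h1
        (hS k j (by omega) hjn)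
        (fun r hr1 hr2 => by
          rcases le_or_gt (r + 2) j with hle | hgt
          · exact h3 r (by omega) hle
          · exact h2 r j (by omega) hjn (Or.inl (by omega)))
        (fun q hq1 hq2 => h2 k q (by omega) (by omega) (Or.inr hq2))
        (h4 k (by omega) (by omega))
      obtain ⟨hRL', hkj, hne⟩ := hst
      refine ⟨hRL', fun p q hpq1 hpq2 hpq3 => ?_, fun r hr1 hr2 => ?_,
        fun r hr1 hr2 => ?_, fun p q hq1 hq2 hq3 => ?_⟩
      · rw [hne p q (by rintro ⟨rfl, rfl⟩; omega)]
        exact h2 p q hpq1 hpq2 hpq3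
      · rcases Nat.eq_or_lt_of_le hr1 with rfl | hlt
        · exact hkj
        · rw [hne r j (by rintro ⟨rfl, -⟩; omega)]
          exact h3 r (by omega) hr2
      · rw [hne r j (by rintro ⟨rfl, -⟩; omega)]
        exact h4 r hr1 (by omega)
      · rw [hne p q (by rintro ⟨-, rfl⟩; omega)]
        exact h5 p q hq1 hq2 hq3)
  obtain ⟨k1, k2, k3, k4, k5⟩ := key
  refine ⟨k1, fun p q hpq1 hpq2 hpq3 => ?_, fun p q hq1 hq2 hq3 => k5 p q hq1 hq2 (by omega)⟩
  rcases hpq3 with hle | hlt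
  · exact k2 p q hpq1 hpq2 (Or.inl hle)
  · rcases Nat.lt_succ_iff_lt_or_eq.mp hlt with hq | rfl
    · exact k2 p q hpq1 hpq2 (Or.inr hq)
    · rcases le_or_gt (p + 2) q with h2le | h2gt
      · exact k3 p (by omega) h2le
      · exact k2 p q hpq1 hpq2 (Or.inl (by omega))

theorem Ffin_spec (tab : List Int) (h : tab ≠ []) :
    RowLen (Ffin tab) tab.length ∧ doneF tab (Ffin tab) tab.length := by
  set n := tab.length with hn
  have hn1 : 1 ≤ n := hn ▸ List.length_pos_of_ne_nil h
  obtain ⟨hSRL, hSE⟩ := Stab_spec tab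
  obtain ⟨hFRL, hFE⟩ := Fb_spec tab
  rw [Ffin, ← hn, foldl_natRange]
  have key := foldl_range_inv
    (f := fun F k => ((List.range ((1 + k) - 1)).reverse).foldl (fun F i =>
      (List.range ((1 + k) - i)).foldl (fun F l =>
        set2 F i (1 + k) (oMin (oMax (get2 F (i + l + 1) (1 + k))
          (oMax (get2 F i (i + l)) (oAbs (get2 (Stab tab) i (1 + k)))))
          (get2 F i (1 + k)))) F) F) (n - 1)
    (Inv := fun F k => RowLen F n ∧ doneF tab F (k + 1) ∧ freshF tab F (k + 1)) (Fb tab)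
    ⟨hFRL,
      fun i j h1 h2 h3 => by rw [hFE i j h1 h2, if_pos (by omega)],
      fun p q h1 h2 h3 => by rw [hFE p q (by omega) h2, if_neg (by omega)]⟩
    (fun t k hk ht => by
      obtain ⟨h1, h2, h3⟩ := ht
      have hcol := col_step tab (Stab tab) t (1 + k) (by omega) (by omega) hSE h1
        (by rwa [Nat.add_comm 1 k]) (by rwa [Nat.add_comm 1 k])
      rw [show 1 + k + 1 = k + 1 + 1 from by omega] at hcol
      exact hcol)
  exact ⟨key.1, by
    have := key.2.1
    rwa [show n - 1 + 1 = n from by omega] at this⟩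

theorem optA_eq_gR' (tab : List Int) (h : tab ≠ []) :
    opt_sum tab = gR (psums tab) 0 tab.length := by
  have hn1 : 1 ≤ tab.length := List.length_pos_of_ne_nil h
  rw [optA_unfold]
  obtain ⟨hRL, hdone⟩ := Ffin_spec tab h
  rw [hdone 0 (tab.length - 1) (by omega) (by omega) (by omega),
    show tab.length - 1 + 1 = tab.length from by omega, Option.getD_some]

-- ---------- the candidate list ----------
def canL (P : List Int) (n : Nat) : List Int :=
  (List.range (n + 1)).flatMap
    (fun a => (natRange (a + 1) (n + 1)).map (fun b => |P.getD b 0 - P.getD a 0|))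

theorem foldl_flatMap {α β γ : Type} (l : List α) (g : α → List β) (f : γ → β → γ) (init : γ) :
    (l.flatMap g).foldl f init = l.foldl (fun acc a => (g a).foldl f acc) init := by
  induction l generalizing init <;> simp [List.foldl_append, *]

theorem setfold_eq (P : List Int) (n : Nat) :
    (List.range (n + 1)).foldl (fun c a =>
      (natRange (a + 1) (n + 1)).foldl
        (fun (c : PySem.Set Int) b => c.add |P.getD b 0 - P.getD a 0|) c)
      PySem.Set.empty = PySem.Set.ofList (canL P n) := by
  rw [PySem.Set.ofList_eq_foldl, canL, foldl_flatMap]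
  congr 1
  funext c a
  rw [List.foldl_map]

theorem mem_canL (P : List Int) (n : Nat) (x : Int) :
    x ∈ canL P n ↔ ∃ a b, a < b ∧ b ≤ n ∧ x = |P.getD b 0 - P.getD a 0| := by
  simp only [canL, List.mem_flatMap, List.mem_map, List.mem_range, mem_natRange]
  constructor
  · rintro ⟨a, ha, b, ⟨hb1, hb2⟩, rfl⟩
    exact ⟨a, b, by omega, by omega, rfl⟩
  · rintro ⟨a, b, h1, h2, rfl⟩
    exact ⟨a, by omega, b, ⟨by omega, by omega⟩, rfl⟩

-- ---------- the binary-search loop ----------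
theorem bsLoop_eq (P : List Int) (n : Nat) (cands : List Int) (Lidx : Nat)
    (hval : ∀ i, i < cands.length → (feasible P n (cands.getD i 0) = true ↔ Lidx ≤ i)) :
    ∀ d lo hi, hi - lo ≤ d → lo ≤ Lidx → Lidx ≤ hi → hi < cands.length →
      bsLoop P n cands lo hi = Lidx := by
  intro d
  induction d with
  | zero =>
      intro lo hi h1 h2 h3 h4
      rw [bsLoop]
      dsimp only
      rw [if_neg (by omega)]
      omega
  | succ d ih =>
      intro lo hi h1 h2 h3 h4
      rw [bsLoop]
      dsimp only
      by_cases hlt : lo < hi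
      · rw [if_pos hlt]
        have hmid1 : lo ≤ (lo + hi) / 2 := by omega
        have hmid2 : (lo + hi) / 2 < hi := by omega
        rcases Bool.eq_false_or_eq_true (feasible P n (cands.getD ((lo + hi) / 2) 0)) with hf | hf
        · rw [hf, if_pos rfl]
          exact ih lo ((lo + hi) / 2) (by omega) h2 ((hval _ (by omega)).mp hf) (by omega)
        · rw [hf, if_neg Bool.false_ne_true]
          refine ih ((lo + hi) / 2 + 1) hi (by omega) ?_ h3 h4
          by_contra hcon
          have htr := (hval ((lo + hi) / 2) (by omega)).mpr (by omega)
          rw [htr] at hf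
          exact Bool.noConfusion hf
      · rw [if_neg hlt]
        omega

-- ---------- B equals the recurrence ----------
theorem optB_eq_gR (tab : List Int) (h : tab ≠ []) :
    opt_sum_alt tab = gR (psums tab) 0 tab.length := by
  unfold opt_sum_alt
  dsimp only
  rw [foldP_eq_psums, setfold_eq]
  set n := tab.length with hn
  set P := psums tab with hP
  have hn1 : 1 ≤ n := hn ▸ List.length_pos_of_ne_nil h
  set cands := PySem.List.sorted (PySem.Set.ofList (canL P n)) (fun x => x) false with hcands
  have hpw : cands.Pairwise (· < ·) := PySem.List.sorted_ofList_pairwise_lt (canL P n)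
  have hmem : ∀ x, x ∈ cands ↔ ∃ a b, a < b ∧ b ≤ n ∧ x = |P.getD b 0 - P.getD a 0| := by
    intro x
    rw [hcands, PySem.List.mem_sorted, PySem.Set.mem_ofList, mem_canL]
  have hg : gR P 0 n ∈ cands := by
    obtain ⟨x, y, hxy, hyn, he⟩ := gR_attained P n n 0 n (by omega) hn1 (le_refl n)
    exact (hmem _).mpr ⟨x, y, hxy, hyn, he⟩
  obtain ⟨Lidx, hLlt, hLval⟩ := List.mem_iff_getElem.mp hg
  have hidx : ∀ i, i < cands.length → (feasible P n (cands.getD i 0) = true ↔ Lidx ≤ i) := by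
    intro i hi
    rw [List.getD_eq_getElem _ _ hi, feasible_eq P n _ hn1, decide_eq_true_iff]
    constructor
    · intro hle
      by_contra hlt
      have hlt' : cands[i] < cands[Lidx] :=
        List.pairwise_iff_getElem.mp hpw i Lidx hi hLlt (by omega)
      rw [hLval] at hlt'
      omega
    · intro hle
      rcases Nat.eq_or_lt_of_le hle with rfl | hlt
      · rw [hLval]
      · have hlt' : cands[Lidx] < cands[i] :=
          List.pairwise_iff_getElem.mp hpw Lidx i hLlt hi hlt
        rw [hLval] at hlt'
        omega
  rw [bsLoop_eq P n cands Lidx hidx cands.length 0 (cands.length - 1)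
    (by omega) (by omega) (by omega) (by omega)]
  rw [List.getD_eq_getElem _ _ hLlt, hLval]

-- ===== VERDICT (by name: the statement is the Claim_ definition above) =====
theorem opt_sum_spec : Claim_equal_opt_sum := by
  intro tab _ hpre
  unfold Spec_opt_sum
  rw [optA_eq_gR' tab hpre, optB_eq_gR tab hpre]
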